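-- pv_equiv track=rewrite | github.com/abulimov/atom-language-haproxy | generate.py | get_data_from_mailers
-- ===== SOURCE A (Python) =====
-- def get_data_from_mailers(lines):
--     keywords = []
--     found_paragraph = False
--     started = False
--     for line in lines:
--         if line.startswith("3.6. Mailers"):
--             found_paragraph = True
--             continue
--         if line.startswith("3.7. Programs"):
--             break
--         if found_paragraph:
--             if line.startswith("mailers <mailersect>"):
--                 started = True
--         if started:
--             stripped = line.strip()
--             if stripped and not line.startswith(" "):
--                 keywords.append(stripped.split()[0])
--     return keywords
-- ===== SOURCE B (Python) =====
-- def _take_until(lines, prefix):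
--     out = []
--     for line in lines:
--         if line.startswith(prefix):
--             break
--         out.append(line)
--     return out
--
--
-- def _drop_until(lines, prefix):
--     i = 0
--     while i < len(lines) and not lines[i].startswith(prefix):
--         i += 1
--     return lines[i:]
--
--
-- def _keep(line):
--     return (not line.startswith("3.6. Mailers")
--             and line.strip() != "" and not line.startswith(" "))
--
--
-- def _first_word(line):
--     return line.strip().split()[0]
--
--
-- def get_data_from_mailers(lines):
--     # Phase 1: the working region ends at the first "3.7. Programs" line.
--     region = _take_until(lines, "3.7. Programs")
--     # Phase 2: find the "3.6. Mailers" header inside it.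
--     rest = _drop_until(region, "3.6. Mailers")
--     if not rest:
--         return []
--     # Phase 3: from after the header, skip to the "mailers <mailersect>" marker
--     # (inclusive) and collect the first word of every non-indented, non-blank,
--     # non-header line.
--     tail = _drop_until(rest[1:], "mailers <mailersect>")
--     return [_first_word(line) for line in tail if _keep(line)]
-- ===== Notes on version B (the rewrite author's own statement) =====
-- stated objective: alternative
-- what changed: Replaces A's single pass with two boolean flags by a three-phase decomposition: truncate the lines at the first '3.7. Programs' line, locate the '3.6. Mailers' header, then from the 'mailers <mailersect>' marker (inclusive) collect the first word of every non-indented, non-blank, non-header line.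
import Mathlib
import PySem

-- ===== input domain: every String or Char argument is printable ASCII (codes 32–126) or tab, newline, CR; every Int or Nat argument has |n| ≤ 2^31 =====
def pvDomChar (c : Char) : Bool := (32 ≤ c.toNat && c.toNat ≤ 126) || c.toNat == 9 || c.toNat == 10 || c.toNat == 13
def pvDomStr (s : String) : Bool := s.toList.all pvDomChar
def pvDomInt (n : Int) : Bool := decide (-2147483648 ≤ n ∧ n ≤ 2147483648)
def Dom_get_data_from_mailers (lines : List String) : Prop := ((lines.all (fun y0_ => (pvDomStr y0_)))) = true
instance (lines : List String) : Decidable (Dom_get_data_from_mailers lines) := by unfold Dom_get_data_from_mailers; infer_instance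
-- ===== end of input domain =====

-- B re-derives the same keywords in three explicit phases (truncate at "3.7. Programs",
-- locate the "3.6. Mailers" header, then collect from the "mailers <mailersect>" marker)
-- instead of A's single flag-driven loop; objective: alternative decomposition, same cost.

-- ===== PORT A =====
-- the flag-driven loop of A: state (found_paragraph, started, keywords)
def goA : List String → Bool → Bool → List String → List String
  | [], _, _, acc => acc
  | l :: ls, found, started, acc =>
    if PySem.Str.startswith l "3.6. Mailers" then goA ls true started acc
    else if PySem.Str.startswith l "3.7. Programs" then acc
    else
      let started' := if found && PySem.Str.startswith l "mailers <mailersect>" then true else started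
      if started' then
        let stripped := PySem.Str.strip l
        if stripped != "" && !PySem.Str.startswith l " " then
          -- stripped.split()[0]: exact, since stripped ≠ "" here makes split() nonempty
          goA ls found started' (acc ++ [(PySem.Str.split₀ stripped).headD ""])
        else goA ls found started' acc
      else goA ls found started' acc

def get_data_from_mailers (lines : List String) : List String :=
  goA lines false false []

-- ===== PORT B =====
-- _take_until: collect lines until one starting with prefix (exclusive)
def takeUntil : List String → String → List String
  | [], _ => []
  | l :: ls, p => if PySem.Str.startswith l p then [] else l :: takeUntil ls p

-- _drop_until: advance an index while the line does not start with prefix (short-circuit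
-- 'i < len(lines) and not lines[i].startswith' as nested ifs), return lines[i:]
def dropUntilGo (lines : List String) (p : String) (i : Nat) : Nat :=
  if h : i < lines.length then
    if PySem.Str.startswith (lines[i]'h) p then i
    else dropUntilGo lines p (i + 1)
  else i
termination_by lines.length - i
decreasing_by omega

def dropUntil (lines : List String) (p : String) : List String :=
  lines.drop (dropUntilGo lines p 0)   -- lines[i:] with 0 ≤ i

-- _keep
def keepB (l : String) : Bool :=
  !PySem.Str.startswith l "3.6. Mailers" && PySem.Str.strip l != "" && !PySem.Str.startswith l " "

-- _first_word: line.strip().split()[0]; exact since _keep guarantees strip ≠ "" (split() nonempty)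
def firstWordB (l : String) : String :=
  (PySem.Str.split₀ (PySem.Str.strip l)).headD ""

def get_data_from_mailers_alt (lines : List String) : List String :=
  let region := takeUntil lines "3.7. Programs"
  let rest := dropUntil region "3.6. Mailers"
  match rest with
  | [] => []
  | _ :: rs =>   -- rest[1:]
    let tail := dropUntil rs "mailers <mailersect>"
    (tail.filter keepB).map firstWordB

-- ===== PRECONDITION & SPEC =====
def Spec_get_data_from_mailers (lines : List String) (out : List String) : Prop := out = get_data_from_mailers_alt lines
instance (lines : List String) (out : List String) : Decidable (Spec_get_data_from_mailers lines out) := by unfold Spec_get_data_from_mailers; infer_instance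

-- ===== CLAIM (what is proved, stated in full; the proofs are below) =====
def Claim_equal_get_data_from_mailers : Prop := ∀ (lines : List String), Dom_get_data_from_mailers lines → Spec_get_data_from_mailers lines (get_data_from_mailers lines)

-- ===== LEMMAS AND PROOFS =====

-- the prefixes "3.6. Mailers" / "3.7. Programs" / "mailers <mailersect>" are mutually exclusive
lemma prefix_excl (l : String) (p q : String)
    (hlen : p.toList.length ≤ q.toList.length)
    (hnp : ¬ (p.toList <+: q.toList))
    (hp : PySem.Str.startswith l p = true) :
    PySem.Str.startswith l q = false := by
  by_contra hc
  rw [Bool.not_eq_false] at hc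
  rw [PySem.Str.startswith_eq, PySem.Chars.startswith_iff] at hp hc
  exact hnp (List.prefix_of_prefix_length_le hp hc hlen)

lemma p36_not_p37 (l : String) (h : PySem.Str.startswith l "3.6. Mailers" = true) :
    PySem.Str.startswith l "3.7. Programs" = false :=
  prefix_excl l _ _ (by decide) (by decide) h

lemma p36_not_pm (l : String) (h : PySem.Str.startswith l "3.6. Mailers" = true) :
    PySem.Str.startswith l "mailers <mailersect>" = false :=
  prefix_excl l _ _ (by decide) (by decide) h

lemma dropUntilGo_stop (lines : List String) (p : String) (i : Nat) (h : ¬ i < lines.length) :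
    dropUntilGo lines p i = i := by
  rw [dropUntilGo]; simp [h]

lemma dropUntilGo_shift (p : String) (l : String) :
    ∀ n (ls : List String) (i : Nat), ls.length - i ≤ n →
      dropUntilGo (l :: ls) p (i + 1) = dropUntilGo ls p i + 1 := by
  intro n
  induction n with
  | zero =>
    intro ls i h
    have hi : ¬ i < ls.length := by omega
    rw [dropUntilGo_stop ls p i hi, dropUntilGo_stop (l :: ls) p (i + 1) (by simp; omega)]
  | succ n ih =>
    intro ls i h
    by_cases hi : i < ls.length
    · have hi' : i + 1 < (l :: ls).length := by simp; omega
      conv_lhs => rw [dropUntilGo]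
      conv_rhs => rw [dropUntilGo]
      have hg : (l :: ls)[i + 1]'hi' = ls[i]'hi := by simp
      simp only [hi, hi', dif_pos, hg]
      by_cases hs : PySem.Str.startswith (ls[i]'hi) p = true
      · rw [if_pos hs, if_pos hs]
      · rw [if_neg hs, if_neg hs]
        exact ih ls (i + 1) (by omega)
    · rw [dropUntilGo_stop ls p i hi, dropUntilGo_stop (l :: ls) p (i + 1) (by simp; omega)]

lemma dropUntil_nil (p : String) : dropUntil [] p = [] := by
  rw [dropUntil, dropUntilGo_stop _ _ _ (by simp)]; simp

lemma dropUntil_cons (p : String) (l : String) (ls : List String) :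
    dropUntil (l :: ls) p =
      if PySem.Str.startswith l p then l :: ls else dropUntil ls p := by
  rw [dropUntil, dropUntil]
  conv_lhs => rw [dropUntilGo]
  have h0 : (0 : Nat) < (l :: ls).length := by simp
  rw [dif_pos h0]
  simp only [List.getElem_cons_zero]
  by_cases hs : PySem.Str.startswith l p = true
  · rw [if_pos hs, if_pos hs]
    simp
  · rw [if_neg hs, if_neg hs]
    rw [dropUntilGo_shift p l ls.length ls 0 (by omega)]
    simp

-- pulling one collected keyword out of A's accumulator
lemma goA_append1 (ls : List String) (f s : Bool) (x : String) :
    goA ls f s [x] = x :: goA ls f s [] := by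
  suffices h : ∀ (ls : List String) (f s : Bool) (acc : List String),
      goA ls f s acc = acc ++ goA ls f s [] by
    rw [h ls f s [x]]; rfl
  intro ls
  induction ls with
  | nil => intro f s acc; simp [goA]
  | cons l ls ih =>
    intro f s acc
    simp only [goA]
    split_ifs
    all_goals try exact ih _ _ _
    all_goals try (rw [ih _ _ (acc ++ _), ih _ _ ([] ++ _)]; simp)
    all_goals simp

-- collecting phase of A (found = started = true) = B's comprehension over the 3.7-truncated tail
lemma goA_collect : ∀ (ls : List String),
    goA ls true true [] = ((takeUntil ls "3.7. Programs").filter keepB).map firstWordB := by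
  intro ls
  induction ls with
  | nil => simp [goA, takeUntil]
  | cons l ls ih =>
    by_cases h36 : PySem.Str.startswith l "3.6. Mailers" = true
    · have h37 := p36_not_p37 l h36
      try simp at h36 h37
      simp [goA, takeUntil, keepB, h36, h37, ih]
    · rw [Bool.not_eq_true] at h36
      by_cases h37 : PySem.Str.startswith l "3.7. Programs" = true
      · try simp at h36 h37
        simp [goA, takeUntil, h36, h37]
      · rw [Bool.not_eq_true] at h37
        try simp at h36 h37
        by_cases hst : PySem.Str.strip l = ""
        · simp [goA, takeUntil, keepB, firstWordB, h36, h37, hst, ih]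
        · by_cases hsp : PySem.Str.startswith l " " = true
          · try simp at hsp
            simp [goA, takeUntil, keepB, firstWordB, h36, h37, hst, hsp, ih]
          · rw [Bool.not_eq_true] at hsp
            try simp at hsp
            simp [goA, takeUntil, keepB, firstWordB, h36, h37, hst, hsp, ih, goA_append1]

-- searching-for-marker phase of A (found = true, started = false)
lemma goA_found : ∀ (ls : List String),
    goA ls true false [] =
      ((dropUntil (takeUntil ls "3.7. Programs") "mailers <mailersect>").filter keepB).map
        firstWordB := by
  intro ls
  induction ls with
  | nil => simp [goA, takeUntil, dropUntil_nil]
  | cons l ls ih =>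
    by_cases h36 : PySem.Str.startswith l "3.6. Mailers" = true
    · have h37 := p36_not_p37 l h36
      have hm := p36_not_pm l h36
      try simp at h36 h37 hm
      simp [goA, takeUntil, dropUntil_cons, h36, h37, hm, ih]
    · rw [Bool.not_eq_true] at h36
      by_cases h37 : PySem.Str.startswith l "3.7. Programs" = true
      · try simp at h36 h37
        simp [goA, takeUntil, dropUntil_nil, h36, h37]
      · rw [Bool.not_eq_true] at h37
        by_cases hm : PySem.Str.startswith l "mailers <mailersect>" = true
        · -- marker line: started becomes true and the line itself is considered
          try simp at h36 h37 hm
          by_cases hst : PySem.Str.strip l = ""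
          · simp [goA, takeUntil, dropUntil_cons, keepB, firstWordB, h36, h37, hm, hst,
              goA_collect]
          · by_cases hsp : PySem.Str.startswith l " " = true
            · try simp at hsp
              simp [goA, takeUntil, dropUntil_cons, keepB, firstWordB, h36, h37, hm, hst, hsp,
                goA_collect]
            · rw [Bool.not_eq_true] at hsp
              try simp at hsp
              simp [goA, takeUntil, dropUntil_cons, keepB, firstWordB, h36, h37, hm, hst, hsp,
                goA_collect, goA_append1]
        · rw [Bool.not_eq_true] at hm
          try simp at h36 h37 hm
          simp [goA, takeUntil, dropUntil_cons, h36, h37, hm, ih]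

lemma main_eq : ∀ (ls : List String),
    goA ls false false [] = get_data_from_mailers_alt ls := by
  intro ls
  induction ls with
  | nil => simp [goA, get_data_from_mailers_alt, takeUntil, dropUntil_nil]
  | cons l ls ih =>
    by_cases h36 : PySem.Str.startswith l "3.6. Mailers" = true
    · have h37 := p36_not_p37 l h36
      try simp at h36 h37
      simp [goA, get_data_from_mailers_alt, takeUntil, dropUntil_cons, h36, h37, goA_found]
    · rw [Bool.not_eq_true] at h36
      by_cases h37 : PySem.Str.startswith l "3.7. Programs" = true
      · try simp at h36 h37
        simp [goA, get_data_from_mailers_alt, takeUntil, dropUntil_nil, h36, h37]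
      · rw [Bool.not_eq_true] at h37
        try simp at h36 h37
        simp only [goA, h36, h37, Bool.false_eq_true, if_false, Bool.false_and]
        rw [ih]
        simp [get_data_from_mailers_alt, takeUntil, dropUntil_cons, h36, h37]

-- ===== VERDICT (by name: the statement is the Claim_ definition above) =====
theorem get_data_from_mailers_spec : Claim_equal_get_data_from_mailers := by
  intro lines _
  show get_data_from_mailers lines = get_data_from_mailers_alt lines
  rw [get_data_from_mailers, main_eq]
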